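-- pv_equiv track=rewrite | github.com/Blizzardnya/yandex-algorithms | Homework_B5/B.py | make_prefix_sums
-- ===== SOURCE A (Python) =====
-- def make_prefix_sums(items):
--     pref_sums = [0] * (len(items) + 1)
--
--     for i in range(1, len(items) + 1):
--         if items[i-1] <= 0:
--             pref_sums[i] = 0
--         else:
--             pref_sums[i] = pref_sums[i-1] + items[i-1]
--
--     return pref_sums
-- ===== SOURCE B (Python) =====
-- def make_prefix_sums(items):
--     # Pass 1: ordinary cumulative sums of the whole list, with no resets.
--     sums = [0]
--     for x in items:
--         sums.append(sums[-1] + x)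
--     # Pass 2: each answer is a difference of cumulative sums: S[i] minus the
--     # cumulative sum at the most recent non-positive position (the base).
--     res = [0]
--     base = 0
--     for s, x in zip(sums[1:], items):
--         if x <= 0:
--             base = s
--             res.append(0)
--         else:
--             res.append(s - base)
--     return res
-- ===== Notes on version B (the rewrite author's own statement) =====
-- stated objective: alternative
-- what changed: Instead of maintaining a running sum that is reset in place, B first computes the unrestricted cumulative sums of the whole list and then derives each output as a difference S[i] - S[last non-positive position].
import Mathlib
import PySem

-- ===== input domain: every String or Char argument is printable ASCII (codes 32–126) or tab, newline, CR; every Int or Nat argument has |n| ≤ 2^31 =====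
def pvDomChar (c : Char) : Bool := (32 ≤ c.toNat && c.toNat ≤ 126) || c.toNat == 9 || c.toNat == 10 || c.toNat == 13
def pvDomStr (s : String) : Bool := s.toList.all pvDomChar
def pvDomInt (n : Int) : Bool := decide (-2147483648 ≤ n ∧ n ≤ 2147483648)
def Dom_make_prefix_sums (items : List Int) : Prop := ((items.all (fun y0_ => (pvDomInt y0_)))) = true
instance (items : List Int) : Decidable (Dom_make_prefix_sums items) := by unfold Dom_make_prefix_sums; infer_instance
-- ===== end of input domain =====

-- B replaces A's in-place reset-on-nonpositive loop by two passes: unrestricted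
-- cumulative sums first, then each output as the difference S[i] - S[last reset]
-- (objective: alternative).

-- ===== PORT A =====
-- pref_sums = [0]*(len(items)+1); for i in range(1, len(items)+1): set pref_sums[i]
def make_prefix_sums (items : List Int) : List Int :=
  let pref := List.replicate (items.length + 1) (0 : Int)
  (PySem.List.pyRange 1 ((items.length : Int) + 1) 1).foldl
    (fun pref i =>
      if PySem.List.pyGetD items (i - 1) 0 ≤ 0 then
        pref.set i.toNat 0
      else
        pref.set i.toNat (PySem.List.pyGetD pref (i - 1) 0 + PySem.List.pyGetD items (i - 1) 0))
    pref

-- ===== PORT B =====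
-- pass 1: sums = [0]; for x in items: sums.append(sums[-1] + x)
def mpsSums (items : List Int) : List Int :=
  items.foldl (fun sums x => sums ++ [PySem.List.pyGetD sums (-1) 0 + x]) [0]

-- pass 2 body: for s, x in zip(sums[1:], items): base/res update
def mpsGo2 (base : Int) : List (Int × Int) → List Int
  | [] => []
  | (s, x) :: rest =>
    if x ≤ 0 then 0 :: mpsGo2 s rest
    else (s - base) :: mpsGo2 base rest

def make_prefix_sums_alt (items : List Int) : List Int :=
  0 :: mpsGo2 0 (((mpsSums items).drop 1).zip items)

-- ===== PRECONDITION & SPEC =====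
def Spec_make_prefix_sums (items : List Int) (out : List Int) : Prop := out = make_prefix_sums_alt items
instance (items : List Int) (out : List Int) : Decidable (Spec_make_prefix_sums items out) := by unfold Spec_make_prefix_sums; infer_instance

-- ===== CLAIM (what is proved, stated in full; the proofs are below) =====
def Claim_equal_make_prefix_sums : Prop := ∀ (items : List Int), Dom_make_prefix_sums items → Spec_make_prefix_sums items (make_prefix_sums items)

-- ===== LEMMAS AND PROOFS =====

-- Reference single scan with reset (used only as a proof intermediary).
def mpsGo (acc : Int) : List Int → List Int
  | [] => []
  | x :: xs =>
    let a := if x ≤ 0 then 0 else acc + x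
    a :: mpsGo a xs

-- Cumulative-sum scan starting at t (proof-side characterisation of pass 1).
def mpsScan (t : Int) : List Int → List Int
  | [] => []
  | x :: xs => (t + x) :: mpsScan (t + x) xs

-- Loop invariant for A's fold.
theorem mps_loop_inv (items : List Int) :
    ∀ (rest procd pre suf : List Int) (acc : Int),
      items = procd ++ rest →
      pre.length = procd.length + 1 →
      suf.length = rest.length →
      pre.getLast? = some acc →
      (PySem.List.pyRange (pre.length : Int) ((items.length : Int) + 1) 1).foldl
        (fun pref i =>
          if PySem.List.pyGetD items (i - 1) 0 ≤ 0 then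
            pref.set i.toNat 0
          else
            pref.set i.toNat (PySem.List.pyGetD pref (i - 1) 0 + PySem.List.pyGetD items (i - 1) 0))
        (pre ++ suf)
      = pre ++ mpsGo acc rest := by
  intro rest
  induction rest with
  | nil =>
    intro procd pre suf acc hitems hpre hsuf _
    have hlen : (items.length : Int) + 1 ≤ (pre.length : Int) := by
      simp [hitems, hpre]
    rw [PySem.List.pyRange_one_eq_nil hlen]
    have : suf = [] := List.eq_nil_of_length_eq_zero (by simp [hsuf])
    simp [this, mpsGo]
  | cons x rest ih =>
    intro procd pre suf acc hitems hpre hsuf hlast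
    match suf, hsuf with
    | s :: suf, hsuf =>
    have hlt : (pre.length : Int) < (items.length : Int) + 1 := by
      simp [hitems, hpre]
    rw [PySem.List.pyRange_one_cons hlt, List.foldl_cons]
    have hx : PySem.List.pyGetD items ((pre.length : Int) - 1) 0 = x := by
      have : ((pre.length : Int) - 1) = ((procd.length : Nat) : Int) := by
        simp [hpre]
      rw [this, PySem.List.pyGetD_natCast, hitems]
      simp [List.getD]
    have hread : PySem.List.pyGetD (pre ++ s :: suf) ((pre.length : Int) - 1) 0 = acc := by
      have hpos : 0 < pre.length := by omega
      have : ((pre.length : Int) - 1) = (((pre.length - 1 : Nat)) : Int) := by omega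
      rw [this, PySem.List.pyGetD_natCast]
      rw [List.getD_append _ _ _ _ (by omega), List.getD_eq_getElem _ _ (by omega)]
      rw [List.getLast?_eq_getElem?, List.getElem?_eq_getElem (by omega)] at hlast
      exact Option.some.inj hlast
    have hset : ∀ v : Int, (pre ++ s :: suf).set ((pre.length : Int)).toNat v
        = (pre ++ [v]) ++ suf := by
      intro v
      simp [List.append_assoc]
    set a : Int := if x ≤ 0 then 0 else acc + x with ha
    have hstep :
        (if PySem.List.pyGetD items ((pre.length : Int) - 1) 0 ≤ 0 then
            (pre ++ s :: suf).set ((pre.length : Int)).toNat 0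
          else
            (pre ++ s :: suf).set ((pre.length : Int)).toNat
              (PySem.List.pyGetD (pre ++ s :: suf) ((pre.length : Int) - 1) 0
                + PySem.List.pyGetD items ((pre.length : Int) - 1) 0))
        = (pre ++ [a]) ++ suf := by
      rw [hx, hread, hset, hset, ha]
      split <;> simp
    rw [hstep]
    have hlen2 : ((pre ++ [a]).length : Int) = (pre.length : Int) + 1 := by simp
    have := ih (procd ++ [x]) (pre ++ [a]) suf a
      (by simp [hitems]) (by simp [hpre]) (by simpa using hsuf) (by simp)
    rw [hlen2] at this
    rw [this]
    simp only [mpsGo, List.append_assoc, List.cons_append, List.nil_append, ← ha]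

-- Pass 1 computes the cumulative-sum scan.
theorem mpsSums_inv (items : List Int) :
    ∀ (pre : List Int) (t : Int), pre ≠ [] → pre.getLast? = some t →
      items.foldl (fun sums x => sums ++ [PySem.List.pyGetD sums (-1) 0 + x]) pre
        = pre ++ mpsScan t items := by
  induction items with
  | nil => intro pre t _ _; simp [mpsScan]
  | cons x xs ih =>
    intro pre t hne hlast
    have hget : PySem.List.pyGetD pre (-1) 0 = t := by
      rw [PySem.List.pyGetD_neg_one pre 0 hne]
      rw [List.getLast?_eq_some_getLast hne] at hlast
      exact Option.some.inj hlast
    simp only [List.foldl_cons, hget]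
    rw [ih (pre ++ [t + x]) (t + x) (by simp) (by simp)]
    simp [mpsScan]

theorem mpsSums_eq (items : List Int) : mpsSums items = 0 :: mpsScan 0 items := by
  simpa using mpsSums_inv items [0] 0 (by simp) (by simp)

-- The zipped difference pass equals the reset scan, under acc = t - base.
theorem mpsGo2_eq (items : List Int) :
    ∀ (t base : Int), mpsGo2 base ((mpsScan t items).zip items) = mpsGo (t - base) items := by
  induction items with
  | nil => intro t base; simp [mpsScan, mpsGo, mpsGo2]
  | cons x xs ih =>
    intro t base
    simp only [mpsScan, List.zip_cons_cons, mpsGo2, mpsGo]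
    by_cases hx : x ≤ 0
    · simp only [if_pos hx]
      rw [ih (t + x) (t + x)]
      simp
    · simp only [if_neg hx]
      rw [ih (t + x) base]
      have : t + x - base = t - base + x := by ring
      rw [this]

-- ===== VERDICT (by name: the statement is the Claim_ definition above) =====
theorem make_prefix_sums_spec : Claim_equal_make_prefix_sums := by
  intro items _
  unfold Spec_make_prefix_sums make_prefix_sums make_prefix_sums_alt
  have h := mps_loop_inv items items [] [0] (List.replicate items.length 0) 0
    rfl rfl (by simp) rfl
  rw [mpsSums_eq, List.drop_one, List.tail_cons, mpsGo2_eq items 0 0]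
  simpa [List.replicate_succ] using h
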